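-- pv_equiv track=rewrite | github.com/Coki628/kyopro_submissions | AtCoder/joi2017final_c.py | build_absmx
-- ===== SOURCE A (Python) =====
-- from itertools import accumulate
--
-- def list2d(a, b, c): return [[c] * b for i in range(a)]
--
-- INF = 10 ** 18
--
-- def build_absmx(H, W, grid):
--     accmx = [None] * H
--     accmn = [None] * H
--     accmxrev = [None] * H
--     accmnrev = [None] * H
--     for i in range(H):
--         accmx[i] = list(accumulate(grid[i], max))
--         accmn[i] = list(accumulate(grid[i], min))
--         accmxrev[i] = list(accumulate(grid[i][::-1], max))[::-1]
--         accmnrev[i] = list(accumulate(grid[i][::-1], min))[::-1]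
--     absmx = list2d(H, W+1, 0)
--     absmxrev = list2d(H, W+1, 0)
--     for i in range(H):
--         for j in range(W):
--             absmx[i][j+1] = abs(accmx[i][j]-accmn[i][j])
--             absmxrev[i][j] = abs(accmxrev[i][j]-accmnrev[i][j])
--     absmx2 = list2d(H+2, W+3, INF)
--     for i in range(H):
--         for j in range(W+1):
--             absmx2[i+1][j+1] = max(absmx[i][j], absmxrev[i][j])
--     return absmx2
-- ===== SOURCE B (Python) =====
-- INF = 10 ** 18
--
--
-- def prefscan(vals):
--     # divide and conquer: list of (max, min) of each nonempty prefix of vals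
--     n = len(vals)
--     if n == 0:
--         return []
--     if n == 1:
--         return [(vals[0], vals[0])]
--     mid = n // 2
--     left = prefscan(vals[:mid])
--     right = prefscan(vals[mid:])
--     mh, ml = left[-1]
--     return left + [(max(mh, h), min(ml, l)) for h, l in right]
--
--
-- def sufscan(vals):
--     # divide and conquer: list of (max, min) of each nonempty suffix of vals
--     n = len(vals)
--     if n == 0:
--         return []
--     if n == 1:
--         return [(vals[0], vals[0])]
--     mid = n // 2
--     left = sufscan(vals[:mid])
--     right = sufscan(vals[mid:])
--     mh, ml = right[0]
--     return [(max(h, mh), min(l, ml)) for h, l in left] + right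
--
--
-- def build_absmx(H, W, grid):
--     res = [[INF] * (W + 3) for _ in range(H + 2)]
--     for i in range(H):
--         row = grid[i]
--         pref = [0] + [h - l for h, l in prefscan(row[:W])]
--         suf = [h - l for h, l in sufscan(row)[:W]] + [0]
--         res[i + 1] = [INF] + [max(p, s) for p, s in zip(pref, suf)] + [INF]
--     return res
-- ===== Notes on version B (the rewrite author's own statement) =====
-- stated objective: alternative
-- what changed: Replaces the four accumulate tables and two abs-difference tables with a divide-and-conquer combine: per row, the (max,min) pairs of all prefixes resp. suffixes are built recursively by splitting the row in half and merging the halves' scans via the left half's last (resp. right half's first) extrema, and each bordered row is written whole into the preallocated INF matrix; Pre_ excludes negative W with 0 < H, where A's rows degenerate to clamped [INF]*(W+3) padding, an accident of its never-running column loops.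
import Mathlib
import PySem

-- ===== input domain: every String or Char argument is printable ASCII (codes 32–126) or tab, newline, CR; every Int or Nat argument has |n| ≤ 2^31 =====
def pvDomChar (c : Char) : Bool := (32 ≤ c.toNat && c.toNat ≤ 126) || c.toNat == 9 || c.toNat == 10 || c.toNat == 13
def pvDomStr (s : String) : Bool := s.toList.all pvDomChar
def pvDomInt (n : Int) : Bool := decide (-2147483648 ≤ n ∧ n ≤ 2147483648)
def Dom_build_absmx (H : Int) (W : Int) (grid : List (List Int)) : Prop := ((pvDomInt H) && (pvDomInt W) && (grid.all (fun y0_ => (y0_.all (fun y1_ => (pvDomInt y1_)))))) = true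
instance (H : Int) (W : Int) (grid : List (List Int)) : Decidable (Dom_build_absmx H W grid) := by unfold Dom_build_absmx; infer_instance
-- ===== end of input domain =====

-- B replaces A's four accumulate tables and two abs-difference tables by a per-row
-- divide-and-conquer scan of (max, min) pairs over prefixes and suffixes, assembling each
-- bordered output row directly (objective: alternative, same result by a different algorithm).

-- ===== PORT A =====
def pvINF : Int := 10 ^ 18

-- list(accumulate(l, f)): the running fold, emitting each intermediate value
def pyAccumGo (f : Int → Int → Int) (a : Int) : List Int → List Int
  | [] => []
  | v :: vs => f a v :: pyAccumGo f (f a v) vs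

def pyAccum (f : Int → Int → Int) : List Int → List Int
  | [] => []
  | x :: xs => x :: pyAccumGo f x xs

-- The [None]*H tables, each position filled once in the range(H) loop, are ported as the
-- maps they produce; index assignment xs[k] = v into a preallocated list is List.set;
-- absmx2[i+1][j+1] = v is List.modify at row i+1 setting column j+1.
def build_absmx (H : Int) (W : Int) (grid : List (List Int)) : List (List Int) :=
  let rng := PySem.List.pyRange 0 H 1
  let accmx := rng.map (fun i => pyAccum max (PySem.List.pyGetD grid i []))
  let accmn := rng.map (fun i => pyAccum min (PySem.List.pyGetD grid i []))
  let accmxrev := rng.map (fun i => (pyAccum max (PySem.List.pyGetD grid i []).reverse).reverse)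
  let accmnrev := rng.map (fun i => (pyAccum min (PySem.List.pyGetD grid i []).reverse).reverse)
  let absmx := rng.map (fun i =>
    (PySem.List.pyRange 0 W 1).foldl (fun row j =>
      row.set (j + 1).toNat
        |PySem.List.pyGetD (PySem.List.pyGetD accmx i []) j 0 -
          PySem.List.pyGetD (PySem.List.pyGetD accmn i []) j 0|)
      (List.replicate (W + 1).toNat 0))
  let absmxrev := rng.map (fun i =>
    (PySem.List.pyRange 0 W 1).foldl (fun row j =>
      row.set j.toNat
        |PySem.List.pyGetD (PySem.List.pyGetD accmxrev i []) j 0 -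
          PySem.List.pyGetD (PySem.List.pyGetD accmnrev i []) j 0|)
      (List.replicate (W + 1).toNat 0))
  let absmx2 := (PySem.List.pyRange 0 (H + 2) 1).map (fun _ => List.replicate (W + 3).toNat pvINF)
  rng.foldl (fun res i =>
    (PySem.List.pyRange 0 (W + 1) 1).foldl (fun res j =>
      res.modify (i + 1).toNat (fun row =>
        row.set (j + 1).toNat
          (max (PySem.List.pyGetD (PySem.List.pyGetD absmx i []) j 0)
               (PySem.List.pyGetD (PySem.List.pyGetD absmxrev i []) j 0)))) res) absmx2

-- ===== PORT B =====
-- Source B's prefscan(vals): divide-and-conquer (max, min) pairs of every nonempty prefix;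
-- vals[:mid] / vals[mid:] with 0 ≤ mid ≤ len are List.take / List.drop, left[-1] on the
-- never-empty left half is getLastD.
def prefscan (vals : List Int) : List (Int × Int) :=
  match vals with
  | [] => []
  | [v] => [(v, v)]
  | v₀ :: v₁ :: rest =>
    let mid := (v₀ :: v₁ :: rest).length / 2
    let left := prefscan ((v₀ :: v₁ :: rest).take mid)
    let right := prefscan ((v₀ :: v₁ :: rest).drop mid)
    let p := left.getLastD (0, 0)
    left ++ right.map (fun q => (max p.1 q.1, min p.2 q.2))
termination_by vals.length
decreasing_by
  · simp only [List.length_take, List.length_cons]; omega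
  · simp only [List.length_drop, List.length_cons]; omega

-- Source B's sufscan(vals): (max, min) pairs of every nonempty suffix; right[0] is headD.
def sufscan (vals : List Int) : List (Int × Int) :=
  match vals with
  | [] => []
  | [v] => [(v, v)]
  | v₀ :: v₁ :: rest =>
    let mid := (v₀ :: v₁ :: rest).length / 2
    let left := sufscan ((v₀ :: v₁ :: rest).take mid)
    let right := sufscan ((v₀ :: v₁ :: rest).drop mid)
    let p := right.headD (0, 0)
    left.map (fun q => (max q.1 p.1, min q.2 p.2)) ++ right
termination_by vals.length
decreasing_by
  · simp only [List.length_take, List.length_cons]; omega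
  · simp only [List.length_drop, List.length_cons]; omega

-- Source B's per-row body: the bordered output row for one grid row
def pvRowOut (W : Int) (row : List Int) : List Int :=
  let pref := 0 :: (prefscan (PySem.List.slice row none (some W))).map (fun p => p.1 - p.2)
  let suf := (PySem.List.slice (sufscan row) none (some W)).map (fun p => p.1 - p.2) ++ [0]
  pvINF :: (List.zipWith max pref suf) ++ [pvINF]

-- res[i+1] = <whole row> is List.set at i+1
def build_absmx_alt (H : Int) (W : Int) (grid : List (List Int)) : List (List Int) :=
  let res := (PySem.List.pyRange 0 (H + 2) 1).map (fun _ => List.replicate (W + 3).toNat pvINF)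
  (PySem.List.pyRange 0 H 1).foldl (fun res i =>
    res.set (i + 1).toNat (pvRowOut W (PySem.List.pyGetD grid i []))) res

-- ===== PRECONDITION & SPEC =====
-- Pre_ excludes the inputs where A raises IndexError (0 < H with fewer than H grid rows,
-- or a needed row shorter than W when 0 < W) and, with 0 < H, negative W: A still returns
-- there, but its rows degenerate to the clamped [INF]*(W+3) padding because its column
-- loops never run — an accident of the implementation, not a matrix anyone asks for.
def Pre_build_absmx (H : Int) (W : Int) (grid : List (List Int)) : Prop :=
  0 < H → (0 ≤ W ∧ H ≤ (grid.length : Int) ∧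
    ∀ row ∈ grid.take H.toNat, W ≤ (row.length : Int))

instance (H : Int) (W : Int) (grid : List (List Int)) : Decidable (Pre_build_absmx H W grid) := by
  unfold Pre_build_absmx; infer_instance

def pvWitness_build_absmx : Int × Int × List (List Int) := (2, 2, [[1, 5], [3, 2]])

def Spec_build_absmx (H : Int) (W : Int) (grid : List (List Int)) (out : List (List Int)) : Prop := out = build_absmx_alt H W grid
instance (H : Int) (W : Int) (grid : List (List Int)) (out : List (List Int)) : Decidable (Spec_build_absmx H W grid out) := by unfold Spec_build_absmx; infer_instance

-- ===== CLAIM (what is proved, stated in full; the proofs are below) =====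
def Claim_equal_build_absmx : Prop := ∀ (H : Int) (W : Int) (grid : List (List Int)), Dom_build_absmx H W grid → Pre_build_absmx H W grid → Spec_build_absmx H W grid (build_absmx H W grid)

-- ===== LEMMAS AND PROOFS =====

-- the sequential (max, min) prefix-pair scan the divide-and-conquer scans are compared to
def pvAccGo (h l : Int) : List Int → List (Int × Int)
  | [] => []
  | v :: vs => (max h v, min l v) :: pvAccGo (max h v) (min l v) vs

def pvAccP : List Int → List (Int × Int)
  | [] => []
  | v :: vs => (v, v) :: pvAccGo v v vs

theorem pvAccGo_shift (vs : List Int) : ∀ (h l x y : Int),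
    pvAccGo (max h x) (min l y) vs = (pvAccGo x y vs).map (fun p => (max h p.1, min l p.2)) := by
  induction vs with
  | nil => intro h l x y; rfl
  | cons v vs ih =>
    intro h l x y
    simp only [pvAccGo, List.map, max_assoc, min_assoc, ih (h := h) (l := l)]

theorem pvAccGo_eq_map (h l : Int) (b : List Int) :
    pvAccGo h l b = (pvAccP b).map (fun p => (max h p.1, min l p.2)) := by
  cases b with
  | nil => rfl
  | cons v vs => simp only [pvAccGo, pvAccP, List.map, pvAccGo_shift vs h l v v]

theorem pvAccGo_append (a b : List Int) : ∀ (h l : Int),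
    pvAccGo h l (a ++ b) = pvAccGo h l a ++ pvAccGo (a.foldl max h) (a.foldl min l) b := by
  induction a with
  | nil => intro h l; simp [pvAccGo]
  | cons v vs ih => intro h l; simp [pvAccGo, ih]

theorem pvAccGo_getLastD (a : List Int) : ∀ (h l x y : Int),
    (pvAccGo h l a).getLastD (x, y) =
      if a.isEmpty then (x, y) else (a.foldl max h, a.foldl min l) := by
  induction a with
  | nil => intro h l x y; rfl
  | cons v vs ih =>
    intro h l x y
    simp only [pvAccGo, List.getLastD_cons, ih, List.isEmpty_cons, List.foldl_cons]
    cases vs <;> simp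

theorem pvAccP_getLastD (x : Int) (a' : List Int) (d : Int × Int) :
    (pvAccP (x :: a')).getLastD d = (a'.foldl max x, a'.foldl min x) := by
  simp only [pvAccP, List.getLastD_cons, pvAccGo_getLastD]
  cases a' <;> simp

theorem pvAccP_append (x : Int) (a' b : List Int) :
    pvAccP ((x :: a') ++ b) =
      pvAccP (x :: a') ++ (pvAccP b).map (fun q =>
        (max ((pvAccP (x :: a')).getLastD (0, 0)).1 q.1,
         min ((pvAccP (x :: a')).getLastD (0, 0)).2 q.2)) := by
  have e1 : pvAccP ((x :: a') ++ b) = (x, x) :: pvAccGo x x (a' ++ b) := rfl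
  have e2 : pvAccP (x :: a') = (x, x) :: pvAccGo x x a' := rfl
  rw [e1, pvAccGo_append, pvAccP_getLastD,
    pvAccGo_eq_map (List.foldl max x a') (List.foldl min x a') b, e2]
  simp

-- prefscan computes the sequential prefix scan
theorem prefscan_eq : ∀ (n : Nat) (vals : List Int), vals.length ≤ n →
    prefscan vals = pvAccP vals := by
  intro n
  induction n with
  | zero =>
    intro vals h
    have : vals = [] := List.eq_nil_of_length_eq_zero (Nat.le_zero.1 h)
    subst this; simp [prefscan, pvAccP]
  | succ n ih =>
    intro vals h
    match vals with
    | [] => simp [prefscan, pvAccP]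
    | [v] => simp [prefscan, pvAccP, pvAccGo]
    | v₀ :: v₁ :: rest =>
      rw [prefscan]
      have hlen : (v₀ :: v₁ :: rest).length = rest.length + 2 := by simp
      set vs := v₀ :: v₁ :: rest with hvs
      set mid := vs.length / 2 with hmid
      have hm1 : 1 ≤ mid := by rw [hmid, hlen]; omega
      have hm2 : mid < vs.length := by rw [hmid]; omega
      have htk : (vs.take mid).length ≤ n := by
        simp only [List.length_take]
        have := h; rw [hlen] at this ⊢
        omega
      have hdr : (vs.drop mid).length ≤ n := by
        simp only [List.length_drop]
        have := h
        omega
      rw [ih _ htk, ih _ hdr]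
      obtain ⟨x, a', hx⟩ : ∃ x a', vs.take mid = x :: a' := by
        cases htake : vs.take mid with
        | nil =>
          exfalso
          have : (vs.take mid).length = min mid vs.length := by simp
          rw [htake] at this
          simp at this
          omega
        | cons x a' => exact ⟨x, a', rfl⟩
      have := pvAccP_append x a' (vs.drop mid)
      rw [← hx] at this
      rw [hx, ← hx, ← this, List.take_append_drop]

-- the suffix scan is the reversed prefix scan of the reversed list
theorem sufscan_eq : ∀ (n : Nat) (vals : List Int), vals.length ≤ n →
    sufscan vals = (pvAccP vals.reverse).reverse := by
  intro n
  induction n with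
  | zero =>
    intro vals h
    have : vals = [] := List.eq_nil_of_length_eq_zero (Nat.le_zero.1 h)
    subst this; simp [sufscan, pvAccP]
  | succ n ih =>
    intro vals h
    match vals with
    | [] => simp [sufscan, pvAccP]
    | [v] => simp [sufscan, pvAccP, pvAccGo]
    | v₀ :: v₁ :: rest =>
      rw [sufscan]
      have hlen : (v₀ :: v₁ :: rest).length = rest.length + 2 := by simp
      set vs := v₀ :: v₁ :: rest with hvs
      set mid := vs.length / 2 with hmid
      have hm1 : 1 ≤ mid := by rw [hmid, hlen]; omega
      have hm2 : mid < vs.length := by rw [hmid]; omega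
      have htk : (vs.take mid).length ≤ n := by
        simp only [List.length_take]; rw [hlen] at h ⊢; omega
      have hdr : (vs.drop mid).length ≤ n := by
        simp only [List.length_drop]; omega
      rw [ih _ htk, ih _ hdr]
      obtain ⟨y, b', hy⟩ : ∃ y b', (vs.drop mid).reverse = y :: b' := by
        cases hrev : (vs.drop mid).reverse with
        | nil =>
          exfalso
          have : (vs.drop mid).reverse.length = vs.length - mid := by simp
          rw [hrev] at this; simp at this; omega
        | cons y b' => exact ⟨y, b', rfl⟩
      have happ := pvAccP_append y b' (vs.take mid).reverse
      rw [← hy] at happ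
      have hsplit : vs.reverse = (vs.drop mid).reverse ++ (vs.take mid).reverse := by
        rw [← List.reverse_append, List.take_append_drop]
      rw [hsplit, happ, List.reverse_append, ← List.map_reverse]
      congr 1
      refine List.map_congr_left fun q _ => ?_
      have hhead : ((pvAccP (vs.drop mid).reverse).reverse).headD (0, 0)
          = (pvAccP (vs.drop mid).reverse).getLastD (0, 0) := by
        simp [List.getLastD_eq_getLast?, List.head?_reverse]
      rw [hhead, max_comm, min_comm]

-- the (max - min) spreads of the pair scan are A's zipped absolute differences
theorem pvMapSpread_accGo (vs : List Int) : ∀ (h l : Int),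
    (pvAccGo h l vs).map (fun p => p.1 - p.2) =
      List.zipWith (fun a b => |a - b|) (pyAccumGo max h vs) (pyAccumGo min l vs) := by
  induction vs with
  | nil => intro h l; rfl
  | cons v vs ih =>
    intro h l
    simp only [pvAccGo, pyAccumGo, List.map, List.zipWith, ih]
    rw [abs_of_nonneg (sub_nonneg.2 (le_trans (min_le_right l v) (le_max_right h v)))]

theorem pvMapSpread_accP (r : List Int) :
    (pvAccP r).map (fun p => p.1 - p.2) =
      List.zipWith (fun a b => |a - b|) (pyAccum max r) (pyAccum min r) := by
  cases r with
  | nil => rfl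
  | cons v vs => simp [pvAccP, pyAccum, pvMapSpread_accGo]

theorem pvAccumGo_take (f : Int → Int → Int) (a : Int) (xs : List Int) (n : Nat) :
    pyAccumGo f a (xs.take n) = (pyAccumGo f a xs).take n := by
  induction xs generalizing a n with
  | nil => simp [pyAccumGo]
  | cons v vs ih =>
    cases n with
    | zero => simp [pyAccumGo]
    | succ k => simp [pyAccumGo, ih (f a v) k]

theorem pvAccum_take (f : Int → Int → Int) (l : List Int) (n : Nat) :
    pyAccum f (l.take n) = (pyAccum f l).take n := by
  cases l with
  | nil => simp [pyAccum]
  | cons v vs =>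
    cases n with
    | zero => simp [pyAccum]
    | succ k => simp [pyAccum, pvAccumGo_take f v vs k]

theorem pvLength_accumGo (f : Int → Int → Int) (a : Int) (l : List Int) :
    (pyAccumGo f a l).length = l.length := by
  induction l generalizing a with
  | nil => rfl
  | cons v vs ih => simp [pyAccumGo, ih (f a v)]

theorem pvLength_accum (f : Int → Int → Int) (l : List Int) :
    (pyAccum f l).length = l.length := by
  cases l with
  | nil => rfl
  | cons v vs => simp [pyAccum, pvLength_accumGo]

-- indexed loop over range(n) reading two sequences of length ≥ n is a zipWith of their prefixes
theorem pvMapRange2 (f : Int → Int → Int) (X Y : List Int) (n : Nat)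
    (hX : n ≤ X.length) (hY : n ≤ Y.length) :
    (PySem.List.pyRange 0 (n : Int) 1).map
        (fun j => f (PySem.List.pyGetD X j 0) (PySem.List.pyGetD Y j 0)) =
      List.zipWith f (X.take n) (Y.take n) := by
  induction n with
  | zero => simp [PySem.List.pyRange_one_eq_nil le_rfl]
  | succ k ih =>
    have hk : (0 : Int) ≤ (k : Int) := by positivity
    have : ((k + 1 : Nat) : Int) = (k : Int) + 1 := by push_cast; ring
    rw [this, PySem.List.pyRange_one_succ_right hk, List.map_append,
      ih (Nat.le_of_succ_le hX) (Nat.le_of_succ_le hY)]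
    have hXk : k < X.length := hX
    have hYk : k < Y.length := hY
    rw [List.take_add_one, List.take_add_one,
      List.zipWith_append (by simp [le_of_lt hXk, le_of_lt hYk, List.length_take])]
    simp [PySem.List.pyGetD_natCast, List.getD_eq_getElem?_getD, hXk, hYk]

-- the row A assembles for grid row r, as a function of r (A's inner indexed loops, with the
-- accumulate-table lookups already collapsed); proof-only helper
def pvARow (n : Nat) (r : List Int) : List Int :=
  pvINF :: ((PySem.List.pyRange 0 ((n : Int) + 1) 1).map (fun j =>
      max (PySem.List.pyGetD (0 :: (PySem.List.pyRange 0 (n : Int) 1).map (fun j' =>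
              |PySem.List.pyGetD (pyAccum max r) j' 0 -
                PySem.List.pyGetD (pyAccum min r) j' 0|)) j 0)
          (PySem.List.pyGetD (((PySem.List.pyRange 0 (n : Int) 1).map (fun j' =>
              |PySem.List.pyGetD ((pyAccum max r.reverse).reverse) j' 0 -
                PySem.List.pyGetD ((pyAccum min r.reverse).reverse) j' 0|)) ++ [0]) j 0))) ++
    [pvINF]

-- length facts for the pair scans
theorem pvLength_accGo (h l : Int) (vs : List Int) : (pvAccGo h l vs).length = vs.length := by
  induction vs generalizing h l with
  | nil => rfl
  | cons v vs ih => simp [pvAccGo, ih]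

theorem pvLength_accP (l : List Int) : (pvAccP l).length = l.length := by
  cases l with
  | nil => rfl
  | cons v vs => simp [pvAccP, pvLength_accGo]

-- per-row equality: A's assembled row = Source B's row
theorem pvRowEq (n : Nat) (r : List Int) (hr : n ≤ r.length) :
    pvARow n r = pvRowOut (n : Int) r := by
  have hlenmaxrev : ((pyAccum max r.reverse).reverse).length = r.length := by
    simp [pvLength_accum]
  have hlenminrev : ((pyAccum min r.reverse).reverse).length = r.length := by
    simp [pvLength_accum]
  unfold pvARow
  rw [pvMapRange2 (fun a b => |a - b|) (pyAccum max r) (pyAccum min r) n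
      (by rw [pvLength_accum]; omega) (by rw [pvLength_accum]; omega),
    pvMapRange2 (fun a b => |a - b|) ((pyAccum max r.reverse).reverse)
      ((pyAccum min r.reverse).reverse) n (by omega) (by omega)]
  have hP : List.zipWith (fun a b => |a - b|) ((pyAccum max r).take n) ((pyAccum min r).take n)
      = (prefscan (r.take n)).map (fun p => p.1 - p.2) := by
    rw [← pvAccum_take, ← pvAccum_take, prefscan_eq (r.take n).length _ le_rfl,
      pvMapSpread_accP]
  have hS : List.zipWith (fun a b => |a - b|) (((pyAccum max r.reverse).reverse).take n)
        (((pyAccum min r.reverse).reverse).take n)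
      = ((sufscan r).take n).map (fun p => p.1 - p.2) := by
    rw [sufscan_eq r.length r le_rfl, List.map_take, List.map_reverse, pvMapSpread_accP,
      ← List.take_zipWith, ← List.reverse_zipWith (by simp [pvLength_accum])]
  rw [hP, hS]
  have h1 : ((n : Int) + 1) = ((n + 1 : Nat) : Int) := by push_cast; ring
  have hPlen : (0 :: (prefscan (r.take n)).map (fun p => p.1 - p.2)).length = n + 1 := by
    rw [prefscan_eq (r.take n).length _ le_rfl]
    simp [pvLength_accP]
    omega
  have hSlen : (((sufscan r).take n).map (fun p : Int × Int => p.1 - p.2) ++ [0]).length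
      = n + 1 := by
    rw [sufscan_eq r.length r le_rfl]
    simp [pvLength_accP]
    omega
  rw [h1, pvMapRange2 max _ _ (n + 1) (le_of_eq hPlen.symm) (le_of_eq hSlen.symm),
    List.take_of_length_le (le_of_eq hPlen), List.take_of_length_le (le_of_eq hSlen)]
  simp [pvRowOut, PySem.List.slice_to_natCast]

-- setting / modifying the position right after a prefix
theorem pvSetAppend {α : Type} (l1 : List α) (x : α) (l2 : List α) (v : α)
    (k : Nat) (hk : k = l1.length) :
    (l1 ++ x :: l2).set k v = l1 ++ v :: l2 := by
  subst hk
  induction l1 with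
  | nil => rfl
  | cons a t ih => simp [ih]

theorem pvModifyAppend {α : Type} (l1 : List α) (x : α) (l2 : List α) (f : α → α)
    (k : Nat) (hk : k = l1.length) :
    (l1 ++ x :: l2).modify k f = l1 ++ f x :: l2 := by
  subst hk
  induction l1 with
  | nil => simp
  | cons a t ih => simpa [List.modify_succ_cons] using ih

theorem pvModifyId {α : Type} (l : List α) (k : Nat) : l.modify k (fun x => x) = l := by
  induction l generalizing k with
  | nil => simp
  | cons a t ih =>
    cases k with
    | zero => simp
    | succ m => simp [List.modify_succ_cons, ih m]

theorem pvModifyModify {α : Type} (l : List α) (k : Nat) (f g : α → α) :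
    (l.modify k f).modify k g = l.modify k (fun x => g (f x)) := by
  induction l generalizing k with
  | nil => simp
  | cons a t ih =>
    cases k with
    | zero => simp
    | succ m => simp [List.modify_succ_cons, ih m]

-- a loop whose every step modifies the same row is one modification of that row
theorem pvFoldlModifyCollapse {α : Type} (L : List Int) (k : Nat) (g : Int → α → α)
    (res : List α) :
    L.foldl (fun r j => r.modify k (g j)) res =
      res.modify k (fun row => L.foldl (fun row j => g j row) row) := by
  induction L generalizing res with
  | nil => simp [pvModifyId]
  | cons j L ih => simp [ih, pvModifyModify]

-- filling positions 1..k of a constant row by index assignment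
theorem pvFillShift (k : Nat) (f : Int → Int) (c : Int) : ∀ (m : Nat),
    (PySem.List.pyRange 0 (k : Int) 1).foldl (fun row j => row.set (j + 1).toNat (f j))
        (c :: List.replicate (k + m) c) =
      c :: ((PySem.List.pyRange 0 (k : Int) 1).map f ++ List.replicate m c) := by
  induction k with
  | zero => intro m; simp [PySem.List.pyRange_one_eq_nil le_rfl]
  | succ k ih =>
    intro m
    have hcast : ((k + 1 : Nat) : Int) = (k : Int) + 1 := by push_cast; ring
    have hbase : k + 1 + m = k + (m + 1) := by omega
    rw [hcast, PySem.List.pyRange_one_succ_right (by positivity), List.foldl_append,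
      List.map_append, hbase, ih (m + 1)]
    have htn : ((k : Int) + 1).toNat = k + 1 := by omega
    have hlen : ((PySem.List.pyRange 0 (k : Int) 1).map f).length = k := by
      simp [PySem.List.length_pyRange_one]
    simp only [List.foldl_cons, List.foldl_nil, htn, List.replicate_succ]
    rw [show (c :: ((PySem.List.pyRange 0 (k : Int) 1).map f ++ c :: List.replicate m c)) =
        ((c :: (PySem.List.pyRange 0 (k : Int) 1).map f) ++ c :: List.replicate m c) by simp]
    rw [pvSetAppend _ _ _ _ _ (by simp [hlen])]
    simp

-- filling positions 0..k-1 of a constant row by index assignment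
theorem pvFillZero (k : Nat) (f : Int → Int) (c : Int) : ∀ (m : Nat),
    (PySem.List.pyRange 0 (k : Int) 1).foldl (fun row j => row.set j.toNat (f j))
        (List.replicate (k + m) c) =
      (PySem.List.pyRange 0 (k : Int) 1).map f ++ List.replicate m c := by
  induction k with
  | zero => intro m; simp [PySem.List.pyRange_one_eq_nil le_rfl]
  | succ k ih =>
    intro m
    have hcast : ((k + 1 : Nat) : Int) = (k : Int) + 1 := by push_cast; ring
    have hbase : k + 1 + m = k + (m + 1) := by omega
    rw [hcast, PySem.List.pyRange_one_succ_right (by positivity), List.foldl_append,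
      List.map_append, hbase, ih (m + 1)]
    have htn : ((k : Int)).toNat = k := by omega
    have hlen : ((PySem.List.pyRange 0 (k : Int) 1).map f).length = k := by
      simp [PySem.List.length_pyRange_one]
    simp only [List.foldl_cons, List.foldl_nil, htn, List.replicate_succ]
    rw [pvSetAppend _ _ _ _ _ hlen.symm]
    simp

theorem pvMapConstPyRange {α : Type} (k : Nat) (b : α) :
    (PySem.List.pyRange 0 (k : Int) 1).map (fun _ => b) = List.replicate k b := by
  rw [List.map_const']
  simp [PySem.List.length_pyRange_one]

-- the three fill loops in the shapes A uses them
theorem pvFillShiftRow (k : Nat) (f : Int → Int) :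
    (PySem.List.pyRange 0 (k : Int) 1).foldl (fun row j => row.set (j + 1).toNat (f j))
        (0 :: List.replicate k (0 : Int)) =
      0 :: (PySem.List.pyRange 0 (k : Int) 1).map f := by
  simpa using pvFillShift k f 0 0

theorem pvFillZeroRow (k : Nat) (f : Int → Int) :
    (PySem.List.pyRange 0 (k : Int) 1).foldl (fun row j => row.set j.toNat (f j))
        (List.replicate (k + 1) (0 : Int)) =
      (PySem.List.pyRange 0 (k : Int) 1).map f ++ [0] := by
  simpa using pvFillZero k f 0 1

theorem pvFillBorderRow (k : Nat) (f : Int → Int) (c : Int) :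
    (PySem.List.pyRange 0 ((k : Int) + 1) 1).foldl (fun row j => row.set (j + 1).toNat (f j))
        (List.replicate (k + 3) c) =
      c :: ((PySem.List.pyRange 0 ((k : Int) + 1) 1).map f ++ [c]) := by
  have h := pvFillShift (k + 1) f c 1
  rw [show ((k + 1 : Nat) : Int) = (k : Int) + 1 by push_cast; ring] at h
  simpa [show k + 1 + 1 = k + 2 by omega, show k + 3 = k + 2 + 1 by omega,
    List.replicate_succ] using h

-- the outer fill loop: each step i replaces row i+1 of the INF matrix
theorem pvOuterFill {α : Type} (F : Int → α → α) (b : α) : ∀ (m : Nat) (rest : List α),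
    (PySem.List.pyRange 0 (m : Int) 1).foldl (fun res i => res.modify (i + 1).toNat (F i))
        (b :: (List.replicate m b ++ rest)) =
      b :: ((PySem.List.pyRange 0 (m : Int) 1).map (fun i => F i b) ++ rest) := by
  intro m
  induction m with
  | zero => intro rest; simp [PySem.List.pyRange_one_eq_nil le_rfl]
  | succ m ih =>
    intro rest
    have hcast : ((m + 1 : Nat) : Int) = (m : Int) + 1 := by push_cast; ring
    rw [hcast, PySem.List.pyRange_one_succ_right (by positivity), List.foldl_append,
      List.map_append, List.replicate_succ', List.append_assoc, List.singleton_append,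
      ih (b :: rest)]
    have htn : ((m : Int) + 1).toNat = m + 1 := by omega
    have hlen : (b :: (PySem.List.pyRange 0 (m : Int) 1).map (fun i => F i b)).length = m + 1 := by
      simp [PySem.List.length_pyRange_one]
    simp only [List.foldl_cons, List.foldl_nil, htn]
    rw [show (b :: ((PySem.List.pyRange 0 (m : Int) 1).map (fun i => F i b) ++ b :: rest)) =
        ((b :: (PySem.List.pyRange 0 (m : Int) 1).map (fun i => F i b)) ++ b :: rest) by simp,
      pvModifyAppend _ _ _ _ _ hlen.symm]
    simp

-- the same outer loop writing whole rows with set instead of modify (B's fill loop)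
theorem pvOuterFillSet {α : Type} (F : Int → α) (b : α) : ∀ (m : Nat) (rest : List α),
    (PySem.List.pyRange 0 (m : Int) 1).foldl (fun res i => res.set (i + 1).toNat (F i))
        (b :: (List.replicate m b ++ rest)) =
      b :: ((PySem.List.pyRange 0 (m : Int) 1).map F ++ rest) := by
  intro m
  induction m with
  | zero => intro rest; simp [PySem.List.pyRange_one_eq_nil le_rfl]
  | succ m ih =>
    intro rest
    have hcast : ((m + 1 : Nat) : Int) = (m : Int) + 1 := by push_cast; ring
    rw [hcast, PySem.List.pyRange_one_succ_right (by positivity), List.foldl_append,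
      List.map_append, List.replicate_succ', List.append_assoc, List.singleton_append,
      ih (b :: rest)]
    have htn : ((m : Int) + 1).toNat = m + 1 := by omega
    have hlen : (b :: (PySem.List.pyRange 0 (m : Int) 1).map F).length = m + 1 := by
      simp [PySem.List.length_pyRange_one]
    simp only [List.foldl_cons, List.foldl_nil, htn]
    rw [show (b :: ((PySem.List.pyRange 0 (m : Int) 1).map F ++ b :: rest)) =
        ((b :: (PySem.List.pyRange 0 (m : Int) 1).map F) ++ b :: rest) by simp,
      pvSetAppend _ _ _ _ _ hlen.symm]
    simp

-- ===== VERDICT (by name: the statement is the Claim_ definition above) =====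
theorem build_absmx_spec : Claim_equal_build_absmx := by
  intro H W grid _ hpre
  unfold Spec_build_absmx
  simp only [build_absmx, build_absmx_alt]
  by_cases hH : H ≤ 0
  · -- no rows are filled: both sides are the untouched H+2 padding rows
    rw [PySem.List.pyRange_one_eq_nil hH]
    rfl
  · rw [not_le] at hH
    obtain ⟨hW, hHlen, hrows⟩ := hpre hH
    have hH0 : 0 ≤ H := le_of_lt hH
    lift H to Nat using hH0 with m
    lift W to Nat using hW with n
    have hm : m ≤ grid.length := by exact_mod_cast hHlen
    -- the initial matrix of both sides is border :: (m border rows ++ [border])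
    rw [show ((m : Int) + 2) = ((m + 2 : Nat) : Int) by push_cast; ring,
      pvMapConstPyRange (m + 2) (List.replicate ((n : Int) + 3).toNat pvINF),
      List.replicate_succ, List.replicate_succ']
    -- collapse each inner column loop into one modification of row i+1
    simp only [pvFoldlModifyCollapse]
    rw [pvOuterFill _ (List.replicate ((n : Int) + 3).toNat pvINF) m
      [List.replicate ((n : Int) + 3).toNat pvINF],
      pvOuterFillSet _ (List.replicate ((n : Int) + 3).toNat pvINF) m
      [List.replicate ((n : Int) + 3).toNat pvINF]]
    congr 1
    congr 1
    refine List.map_congr_left ?_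
    intro i hi
    rw [PySem.List.mem_pyRange_one] at hi
    have hilen : i < (grid.length : Int) := lt_of_lt_of_le hi.2 (by exact_mod_cast hHlen)
    have hrowmem : PySem.List.pyGetD grid i [] ∈ grid.take m := by
      rw [PySem.List.pyGetD_eq_getElem grid [] hi.1 hilen]
      have : (grid.take m)[i.toNat]'(by simp; omega) = grid[i.toNat]'(by omega) :=
        List.getElem_take
      rw [← this]
      exact List.getElem_mem _
    have hlen : n ≤ (PySem.List.pyGetD grid i []).length := by
      have := hrows _ (by simpa using hrowmem)
      exact_mod_cast this
    -- collapse the table lookups at row i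
    simp only [PySem.List.pyGetD_map_pyRange_of_nonneg, hi.1, hi.2]
    -- the two table rows are fills of [0]*(W+1), the output row a fill of the border row
    rw [show ((n : Int) + 1).toNat = n + 1 by omega,
      show ((n : Int) + 3).toNat = n + 3 by omega]
    rw [pvFillZeroRow n _, List.replicate_succ, pvFillShiftRow n _, pvFillBorderRow n _ pvINF]
    have := pvRowEq n (PySem.List.pyGetD grid i []) hlen
    unfold pvARow at this
    simpa using this
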